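-- pv_equiv track=rewrite | github.com/mrbartrns/algorithm-and-structure | BOJ/skill_boj/n_number_2.py | transform
-- ===== SOURCE A (Python) =====
-- def transform(c, k):
--     t = 0
--     if not c:
--         return 0
--
--     if c >= "0" and c <= "9":
--         t = (k ** (len(c) - 1)) * int(c[0]) + transform(c[1:], k)
--     else:
--         t = (k ** (len(c) - 1)) * (ord(c[0]) - ord("A") + 10) + transform(c[1:], k)
--
--     return t
-- ===== SOURCE B (Python) =====
-- def transform(c, k):
--     # Horner's method: one left-to-right pass, no slicing and no pow.
--     # Each character's value is decided from the character itself.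
--     t = 0
--     for d in c:
--         t = t * k + (int(d) if "0" <= d <= "9" else ord(d) - ord("A") + 10)
--     return t
-- ===== Notes on version B (the rewrite author's own statement) =====
-- stated objective: faster
-- what changed: Replaces A's O(n^2) recursion (string slicing plus k**(len-1) at every step, with the digit test done by comparing the whole remaining string) by a single iterative Horner pass that classifies each character on its own.
-- intended difference: On strings containing the digit '9' anywhere before the last character (with k != 0), A's whole-string comparison c <= "9" fails, so A mis-values that '9' as ord('9')-ord('A')+10 = 2; B returns the intended digit value 9, e.g. transform("90",2): A gives 4, B gives 18. — e.g. on transform("90", 2): A returns 4, B returns 18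
import Mathlib
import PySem

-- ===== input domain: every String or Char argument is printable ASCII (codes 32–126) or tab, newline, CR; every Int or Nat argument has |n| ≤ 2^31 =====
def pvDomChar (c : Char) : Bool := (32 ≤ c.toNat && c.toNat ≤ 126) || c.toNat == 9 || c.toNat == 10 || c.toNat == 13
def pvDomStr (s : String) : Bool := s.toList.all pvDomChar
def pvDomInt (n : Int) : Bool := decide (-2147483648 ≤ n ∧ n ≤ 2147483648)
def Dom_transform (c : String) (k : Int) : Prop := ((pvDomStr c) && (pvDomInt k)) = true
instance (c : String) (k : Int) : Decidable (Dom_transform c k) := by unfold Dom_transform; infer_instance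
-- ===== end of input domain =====

-- B replaces A's quadratic recursion (slice + pow each step) by one iterative Horner pass; return-value equivalence only, outside D_transform below.

-- ===== PORT A =====
-- Python string `<=` is code-point lexicographic; this helper is exact on List Char.
def pyStrLe : List Char → List Char → Bool
  | [], _ => true
  | _ :: _, [] => false
  | a :: as, b :: bs => if a < b then true else if a = b then pyStrLe as bs else false

-- literal transliteration of A's recursion, over c.toList (c[0], c[1:], len(c))
def transformRec : List Char → Int → Int
  | [], _ => 0
  | d :: rest, k =>
    if pyStrLe ['0'] (d :: rest) && pyStrLe (d :: rest) ['9'] then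
      k ^ rest.length * ((PySem.Int.ofChars? [d]).getD 0) + transformRec rest k
    else
      k ^ rest.length * ((d.toNat : Int) - 65 + 10) + transformRec rest k

def transform (c : String) (k : Int) : Int := transformRec c.toList k

-- ===== PORT B =====
-- per-character value of Source B: int(d) if '0' <= d <= '9' else ord(d) - ord('A') + 10
def pvCharVal (d : Char) : Int :=
  if '0' ≤ d ∧ d ≤ '9' then (PySem.Int.ofChars? [d]).getD 0 else (d.toNat : Int) - 65 + 10

def transform_alt (c : String) (k : Int) : Int :=
  c.toList.foldl (fun t d => t * k + pvCharVal d) 0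

-- ===== PRECONDITION & SPEC =====
-- On strings with a '9' before the last character (and k ≠ 0), A's whole-string comparison c <= "9"
-- fails and A mis-values that '9' as 2 (= ord('9')-ord('A')+10); B returns the intended digit value 9.
def D_transform (c : String) (k : Int) : Prop := '9' ∈ c.toList.dropLast ∧ k ≠ 0
instance (c : String) (k : Int) : Decidable (D_transform c k) := by unfold D_transform; infer_instance

def Spec_transform (c : String) (k : Int) (out : Int) : Prop := ¬ D_transform c k → out = transform_alt c k
instance (c : String) (k : Int) (out : Int) : Decidable (Spec_transform c k out) := by unfold Spec_transform; infer_instance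

def pvDiffWitness_transform : String × Int := ("90", 2)
def pvDiffWitnessOut_transform : Int × Int := (4, 18)

-- ===== CLAIM (what is proved, stated in full; the proofs are below) =====
def Claim_unchanged_transform : Prop := ∀ (c : String) (k : Int), Dom_transform c k → Spec_transform c k (transform c k)
def Claim_changed_transform : Prop := Dom_transform (pvDiffWitness_transform.1) (pvDiffWitness_transform.2) ∧ D_transform (pvDiffWitness_transform.1) (pvDiffWitness_transform.2) ∧ transform (pvDiffWitness_transform.1) (pvDiffWitness_transform.2) = pvDiffWitnessOut_transform.1 ∧ transform_alt (pvDiffWitness_transform.1) (pvDiffWitness_transform.2) = pvDiffWitnessOut_transform.2 ∧ pvDiffWitnessOut_transform.1 ≠ pvDiffWitnessOut_transform.2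

-- ===== LEMMAS AND PROOFS =====

theorem pyStrLe_zero_iff (d : Char) (rest : List Char) :
    pyStrLe ['0'] (d :: rest) = true ↔ '0' ≤ d := by
  simp only [pyStrLe]
  rcases lt_trichotomy '0' d with h | h | h
  · simp [h, le_of_lt h]
  · subst h; simp
  · simp [not_lt_of_gt h, ne_of_gt h, not_le_of_gt h]

theorem pyStrLe_nine_iff (d : Char) (rest : List Char) :
    pyStrLe (d :: rest) ['9'] = true ↔ (d < '9' ∨ (d = '9' ∧ rest = [])) := by
  simp only [pyStrLe]
  rcases lt_trichotomy d '9' with h | h | h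
  · simp [h]
  · subst h
    cases rest <;> simp [pyStrLe]
  · simp [not_lt_of_gt h, ne_of_gt h]

theorem transformRec_cons (d : Char) (rest : List Char) (k : Int) :
    transformRec (d :: rest) k
      = k ^ rest.length *
          (if '0' ≤ d ∧ (d < '9' ∨ (d = '9' ∧ rest = [])) then
            (PySem.Int.ofChars? [d]).getD 0
          else (d.toNat : Int) - 65 + 10)
        + transformRec rest k := by
  have hb : (pyStrLe ['0'] (d :: rest) && pyStrLe (d :: rest) ['9']) = true
      ↔ ('0' ≤ d ∧ (d < '9' ∨ (d = '9' ∧ rest = []))) := by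
    rw [Bool.and_eq_true, pyStrLe_zero_iff, pyStrLe_nine_iff]
  simp only [transformRec]
  by_cases hc : '0' ≤ d ∧ (d < '9' ∨ (d = '9' ∧ rest = []))
  · rw [if_pos (hb.mpr hc), if_pos hc]
  · rw [if_neg (fun h => hc (hb.mp h)), if_neg hc]

theorem transformRec_cons_val (d : Char) (rest : List Char) (k : Int)
    (h : d = '9' → rest = []) :
    transformRec (d :: rest) k = k ^ rest.length * pvCharVal d + transformRec rest k := by
  rw [transformRec_cons]
  have hiff : ('0' ≤ d ∧ (d < '9' ∨ (d = '9' ∧ rest = []))) ↔ ('0' ≤ d ∧ d ≤ '9') := by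
    constructor
    · rintro ⟨h0, h1 | ⟨rfl, -⟩⟩
      · exact ⟨h0, le_of_lt h1⟩
      · exact ⟨h0, le_refl _⟩
    · rintro ⟨h0, h1⟩
      rcases lt_or_eq_of_le h1 with hlt | heq
      · exact ⟨h0, Or.inl hlt⟩
      · exact ⟨h0, Or.inr ⟨heq, h heq⟩⟩
  unfold pvCharVal
  rw [if_congr hiff rfl rfl]

theorem foldl_horner_shift (k : Int) (l : List Char) (t : Int) :
    l.foldl (fun t d => t * k + pvCharVal d) t
      = t * k ^ l.length + l.foldl (fun t d => t * k + pvCharVal d) 0 := by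
  induction l generalizing t with
  | nil => simp
  | cons d l ih =>
      simp only [List.foldl_cons, List.length_cons]
      rw [ih (t * k + pvCharVal d), ih (0 * k + pvCharVal d)]
      ring

theorem foldl_horner_cons (k : Int) (d : Char) (l : List Char) :
    (d :: l).foldl (fun t d => t * k + pvCharVal d) 0
      = pvCharVal d * k ^ l.length + l.foldl (fun t d => t * k + pvCharVal d) 0 := by
  rw [List.foldl_cons, foldl_horner_shift]
  ring

theorem foldl_horner_zero (l : List Char) (t t' : Int) (h : l ≠ []) :
    l.foldl (fun t d => t * 0 + pvCharVal d) t
      = l.foldl (fun t d => t * 0 + pvCharVal d) t' := by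
  cases l with
  | nil => exact absurd rfl h
  | cons d l => simp

theorem transformRec_no_nine (k : Int) (l : List Char) (h : '9' ∉ l.dropLast) :
    transformRec l k = l.foldl (fun t d => t * k + pvCharVal d) 0 := by
  induction l with
  | nil => simp [transformRec]
  | cons d rest ih =>
      cases rest with
      | nil =>
          rw [transformRec_cons_val d [] k (fun _ => rfl)]
          simp [transformRec]
      | cons e rs =>
          have hd9 : d ≠ '9' := by
            intro hrfl; exact h (by simp [hrfl, List.dropLast])
          have hrest : '9' ∉ (e :: rs).dropLast := by
            intro hm; exact h (by simp [List.dropLast, hm])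
          rw [transformRec_cons_val d (e :: rs) k (fun hh => absurd hh hd9), ih hrest]
          conv_rhs => rw [foldl_horner_cons]
          ring

theorem transformRec_k_zero (l : List Char) :
    transformRec l 0 = l.foldl (fun t d => t * 0 + pvCharVal d) 0 := by
  induction l with
  | nil => simp [transformRec]
  | cons d rest ih =>
      cases rest with
      | nil =>
          rw [transformRec_cons_val d [] 0 (fun _ => rfl)]
          simp [transformRec]
      | cons e rs =>
          rw [transformRec_cons]
          have hpow : (0 : Int) ^ (e :: rs).length = 0 := by simp
          rw [hpow, zero_mul, zero_add, ih, List.foldl_cons]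
          exact foldl_horner_zero (e :: rs) 0 (0 * 0 + pvCharVal d) (by simp)

-- ===== VERDICT (by name: the statement is the Claim_ definition above) =====
theorem transform_spec : Claim_unchanged_transform := by
  intro c k _ hD
  unfold D_transform at hD
  show transform c k = transform_alt c k
  unfold transform transform_alt
  by_cases hk : k = 0
  · subst hk; exact transformRec_k_zero c.toList
  · have h9 : '9' ∉ c.toList.dropLast := by
      intro hm; exact hD ⟨hm, hk⟩
    exact transformRec_no_nine k c.toList h9

theorem transform_changed : Claim_changed_transform := by
  unfold Claim_changed_transform; decide
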